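-- pv_equiv track=rewrite | github.com/omaxx/eznet | eznet/utils.py | interface_name_to_port
-- ===== SOURCE A (Python) =====
-- from typing import Union, Dict, Any, Tuple, TypeVar, List
--
-- def interface_name_to_port(interface_name: str) -> List[int]:
--     if ":" in interface_name:
--         return [
--             *interface_name_to_port(interface_name.split(":")[0]),
--             int(interface_name.split(":")[1])
--         ]
--     if "-" in interface_name:
--         return [
--             i for i in map(int, interface_name.split("-")[1].split("/"))
--         ]
--     if interface_name[:2] == 'ae':
--         return [int(interface_name[2:])]
-- ===== SOURCE B (Python) =====
-- def interface_name_to_port(interface_name):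
--     # Stage 1: tokenize — collect the numeric substrings without converting anything.
--     head, colon, tail = interface_name.partition(":")
--     if "-" in head:
--         tokens = head.split("-")[1].split("/")
--     elif head[:2] == "ae":
--         tokens = [head[2:]]
--     else:
--         tokens = None
--     if not colon:
--         return None if tokens is None else [int(t) for t in tokens]
--     # Stage 2: one conversion pass over all collected tokens (TypeError here if head matched nothing).
--     return [int(t) for t in tokens + [tail.partition(":")[0]]]
-- ===== Notes on version B (the rewrite author's own statement) =====
-- stated objective: simpler
-- what changed: B is non-recursive and staged: one partition(':') splits off the tail, the head is tokenized into numeric substrings with no conversions, and a single final comprehension converts all collected tokens with int - instead of A's recursion on the colon head with per-branch int conversions and repeated full-string splits.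
-- outside the precondition, e.g. on interface_name_to_port(':'): A raises TypeError, B raises TypeError
import Mathlib
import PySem

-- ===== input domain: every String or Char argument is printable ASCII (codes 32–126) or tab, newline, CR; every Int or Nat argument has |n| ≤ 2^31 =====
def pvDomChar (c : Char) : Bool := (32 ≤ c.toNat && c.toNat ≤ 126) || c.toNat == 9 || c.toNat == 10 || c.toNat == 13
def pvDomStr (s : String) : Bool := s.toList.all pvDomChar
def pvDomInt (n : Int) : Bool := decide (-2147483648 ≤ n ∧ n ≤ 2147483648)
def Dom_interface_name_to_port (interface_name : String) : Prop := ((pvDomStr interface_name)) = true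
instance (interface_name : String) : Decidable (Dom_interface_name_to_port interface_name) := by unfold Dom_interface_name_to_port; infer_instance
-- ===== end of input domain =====

-- B is non-recursive and staged: partition(':') once, tokenize the head to numeric substrings,
-- then one final conversion pass over all tokens (objective: simpler).

-- ===== PORT A =====
-- the list comprehension [i for i in map(int, tokens)] : left-to-right, first bad token = ValueError (none)
def pvAListInts (ts : List (List Char)) : Option (List Int) :=
  ts.foldlM (fun acc t => (PySem.Int.ofChars? t).map (fun i => acc ++ [i])) []

-- A's recursion, fuel is a totality guard only (the recursive call's argument carries no ':' so depth ≤ 2);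
-- fuel 0 is never reached from interface_name_to_port.
def pvAGo : Nat → List Char → Option (List Int)
  | 0, _ => none
  | fuel+1, cs =>
    if PySem.Chars.isIn [':'] cs then
      match pvAGo fuel (PySem.List.pyGetD (PySem.Chars.splitOn cs [':']) 0 []),
            PySem.Int.ofChars? (PySem.List.pyGetD (PySem.Chars.splitOn cs [':']) 1 []) with
      | some pre, some n => some (pre ++ [n])
      | _, _ => none            -- Python raises (TypeError / ValueError) here: outside Pre_
    else if PySem.Chars.isIn ['-'] cs then
      pvAListInts (PySem.Chars.splitOn (PySem.List.pyGetD (PySem.Chars.splitOn cs ['-']) 1 []) ['/'])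
    else if PySem.List.slice cs none (some 2) = ['a', 'e'] then
      (PySem.Int.ofChars? (PySem.List.slice cs (some 2) none)).map (fun n => [n])
    else
      none                      -- Python falls through: returns None

def interface_name_to_port (interface_name : String) : Option (List Int) :=
  pvAGo (interface_name.toList.length + 1) interface_name.toList

-- ===== PORT B =====
-- str.partition(sep) for a single-character sep: (before, sep-found?, after) at the FIRST
-- occurrence; exact hand port (PySem has no partition primitive).
def pvPartition (c : Char) : List Char → List Char × Bool × List Char
  | [] => ([], false, [])
  | x :: xs =>
    if x = c then ([], true, xs)
    else
      let r := pvPartition c xs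
      (x :: r.1, r.2.1, r.2.2)

-- stage 1 of Source B: the numeric substrings of the head, none = Python's tokens = None
def pvBTokens (head : List Char) : Option (List (List Char)) :=
  if PySem.Chars.isIn ['-'] head then
    some (PySem.Chars.splitOn (PySem.List.pyGetD (PySem.Chars.splitOn head ['-']) 1 []) ['/'])
  else if PySem.List.slice head none (some 2) = ['a', 'e'] then
    some [PySem.List.slice head (some 2) none]
  else none

def interface_name_to_port_alt (interface_name : String) : Option (List Int) :=
  let p := pvPartition ':' interface_name.toList
  match pvBTokens p.1 with
  | none => none                -- no colon: Python returns None; with colon: TypeError, outside Pre_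
  | some ts =>
    if p.2.1 then (ts ++ [(pvPartition ':' p.2.2).1]).mapM PySem.Int.ofChars?
    else ts.mapM PySem.Int.ofChars?

-- ===== PRECONDITION & SPEC =====
-- Pre_ excludes exactly the inputs on which Python A raises: a token that int() rejects in the
-- branch taken (ValueError), or a name with a colon whose head part parses to None (TypeError
-- when that None is unpacked).
def pvTokOK (t : List Char) : Bool := (PySem.Int.ofChars? t).isSome

def pvHeadOK (p : List Char) : Bool :=
  if PySem.Chars.isIn ['-'] p then
    (PySem.Chars.splitOn (PySem.List.pyGetD (PySem.Chars.splitOn p ['-']) 1 []) ['/']).all pvTokOK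
  else if PySem.List.slice p none (some 2) = ['a', 'e'] then pvTokOK (PySem.List.slice p (some 2) none)
  else true

def pvHeadSome (p : List Char) : Bool :=
  PySem.Chars.isIn ['-'] p || decide (PySem.List.slice p none (some 2) = ['a', 'e'])

def Pre_interface_name_to_port (interface_name : String) : Prop :=
  (let parts := PySem.Chars.splitOn interface_name.toList [':']
   pvHeadOK (PySem.List.pyGetD parts 0 []) &&
     (parts.length == 1 ||
       (pvHeadSome (PySem.List.pyGetD parts 0 []) && pvTokOK (PySem.List.pyGetD parts 1 [])))) = true

instance (interface_name : String) : Decidable (Pre_interface_name_to_port interface_name) := by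
  unfold Pre_interface_name_to_port; infer_instance

def pvWitness_interface_name_to_port : String := "xe-0/0/0:1"

def Spec_interface_name_to_port (interface_name : String) (out : Option (List Int)) : Prop :=
  out = interface_name_to_port_alt interface_name

instance (interface_name : String) (out : Option (List Int)) : Decidable (Spec_interface_name_to_port interface_name out) := by
  unfold Spec_interface_name_to_port; infer_instance

-- ===== CLAIM (what is proved, stated in full; the proofs are below) =====
def Claim_equal_interface_name_to_port : Prop := ∀ (interface_name : String), Dom_interface_name_to_port interface_name → Pre_interface_name_to_port interface_name → Spec_interface_name_to_port interface_name (interface_name_to_port interface_name)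

-- ===== LEMMAS AND PROOFS =====

-- reference splitter on a single-character separator
def pvSpl (c : Char) : List Char → List (List Char)
  | [] => [[]]
  | x :: xs =>
    match pvSpl c xs with
    | [] => []
    | h :: t => if x = c then [] :: h :: t else (x :: h) :: t

theorem pvSpl_ne_nil (c : Char) (l : List Char) : pvSpl c l ≠ [] := by
  induction l with
  | nil => simp [pvSpl]
  | cons x xs ih =>
    cases h : pvSpl c xs with
    | nil => exact absurd h ih
    | cons a b => simp only [pvSpl, h]; split <;> simp

theorem pvSplitOn_go_eq (c : Char) (l : List Char) (fuel : Nat) (cur : List Char)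
    (acc : List (List Char)) (hf : l.length ≤ fuel) :
    PySem.Chars.splitOn.go [c] fuel l cur acc =
      acc.reverse ++ (match pvSpl c l with
                      | [] => []
                      | h :: t => (cur.reverse ++ h) :: t) := by
  induction l generalizing fuel cur acc with
  | nil =>
    cases fuel <;> simp [PySem.Chars.splitOn.go, pvSpl]
  | cons x xs ih =>
    cases fuel with
    | zero => simp at hf
    | succ f =>
      have hf' : xs.length ≤ f := by simpa using hf
      by_cases hx : c = x
      · subst hx
        simp only [PySem.Chars.splitOn.go, List.isPrefixOf, BEq.rfl, Bool.and_self, if_true,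
          List.length_cons, List.length_nil, List.drop_succ_cons, List.drop_zero]
        rw [ih f [] (cur.reverse :: acc) hf']
        cases h : pvSpl c xs with
        | nil => exact absurd h (pvSpl_ne_nil c xs)
        | cons h t => simp [pvSpl, h]
      · have hpre : List.isPrefixOf [c] (x :: xs) = false := by
          simp only [List.isPrefixOf, Bool.and_true, beq_eq_false_iff_ne, ne_eq]
          exact hx
        simp only [PySem.Chars.splitOn.go, hpre]
        rw [ih f (x :: cur) acc hf']
        cases h : pvSpl c xs with
        | nil => exact absurd h (pvSpl_ne_nil c xs)
        | cons h t => simp [pvSpl, h, Ne.symm hx]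

theorem pvSplitOn_eq (c : Char) (l : List Char) :
    PySem.Chars.splitOn l [c] = pvSpl c l := by
  unfold PySem.Chars.splitOn
  rw [pvSplitOn_go_eq c l (l.length + 1) [] [] (by omega)]
  cases h : pvSpl c l with
  | nil => exact absurd h (pvSpl_ne_nil c l)
  | cons h t => simp

theorem pvSpl_of_not_mem (c : Char) (l : List Char) (h : c ∉ l) : pvSpl c l = [l] := by
  induction l with
  | nil => rfl
  | cons x xs ih =>
    simp only [List.mem_cons, not_or] at h
    rw [pvSpl, ih h.2]
    simp [Ne.symm h.1]

theorem pvSpl_head_not_mem (c : Char) (l : List Char) :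
    c ∉ (pvSpl c l).headD [] := by
  induction l with
  | nil => simp [pvSpl]
  | cons x xs ih =>
    simp only [pvSpl]
    cases hs : pvSpl c xs with
    | nil => exact absurd hs (pvSpl_ne_nil c xs)
    | cons h t =>
      rw [hs] at ih
      by_cases hx : x = c
      · simp [hx]
      · simpa [hx, Ne.symm hx] using ih

theorem pvIsIn_singleton (c : Char) (l : List Char) :
    PySem.Chars.isIn [c] l = true ↔ c ∈ l := by
  rw [PySem.Chars.isIn_iff_infix]
  constructor
  · intro h; exact h.mem (List.mem_singleton_self c)
  · intro h
    obtain ⟨a, b, rfl⟩ := List.append_of_mem h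
    exact ⟨a, b, by simp⟩

theorem pvPartition_of_not_mem (c : Char) (l : List Char) (h : c ∉ l) :
    pvPartition c l = (l, false, []) := by
  induction l with
  | nil => rfl
  | cons x xs ih =>
    simp only [List.mem_cons, not_or] at h
    simp [pvPartition, Ne.symm h.1, ih h.2]

theorem pvPartition_fst_eq_headD (c : Char) (l : List Char) :
    (pvPartition c l).1 = (pvSpl c l).headD [] := by
  induction l with
  | nil => simp [pvPartition, pvSpl]
  | cons x xs ih =>
    simp only [pvPartition, pvSpl]
    cases hs : pvSpl c xs with
    | nil => exact absurd hs (pvSpl_ne_nil c xs)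
    | cons h t =>
      rw [hs] at ih
      by_cases hx : x = c
      · simp [hx]
      · simpa [hx] using ih

theorem pvPartition_of_mem (c : Char) (l : List Char) (h : c ∈ l) :
    (pvPartition c l).2.1 = true ∧
      pvSpl c l = (pvPartition c l).1 :: pvSpl c (pvPartition c l).2.2 := by
  induction l with
  | nil => simp at h
  | cons x xs ih =>
    by_cases hx : x = c
    · subst hx
      simp only [pvPartition, pvSpl]
      cases hs : pvSpl x xs with
      | nil => exact absurd hs (pvSpl_ne_nil x xs)
      | cons h' t => simp [hs]
    · have hc : c ∈ xs := by
        rcases List.mem_cons.mp h with h1 | h1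
        · exact absurd h1.symm hx
        · exact h1
      obtain ⟨ih1, ih2⟩ := ih hc
      simp only [pvPartition, if_neg hx]
      refine ⟨ih1, ?_⟩
      simp only [pvSpl, ih2, if_neg hx]

theorem pvFoldlM_eq_mapM (ts : List (List Char)) (acc : List Int) :
    ts.foldlM (fun acc t => (PySem.Int.ofChars? t).map (fun i => acc ++ [i])) acc =
      (ts.mapM PySem.Int.ofChars?).map (fun l => acc ++ l) := by
  induction ts generalizing acc with
  | nil => simp
  | cons t ts ih =>
    cases h : PySem.Int.ofChars? t with
    | none => simp [List.foldlM_cons, List.mapM_cons, h]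
    | some n =>
      simp only [List.foldlM_cons, List.mapM_cons, h, Option.map_some]
      show List.foldlM _ (acc ++ [n]) ts = _
      rw [ih]
      cases ts.mapM PySem.Int.ofChars? <;> simp

theorem pvAListInts_eq (ts : List (List Char)) :
    pvAListInts ts = ts.mapM PySem.Int.ofChars? := by
  rw [pvAListInts, pvFoldlM_eq_mapM]
  simp

-- A's head recursion computes exactly 'tokenize then convert' when the argument has no colon
theorem pvAGo_no_colon (p : List Char) (fuel : Nat) (h : ':' ∉ p) :
    pvAGo (fuel + 1) p =
      match pvBTokens p with
      | none => none
      | some ts => ts.mapM PySem.Int.ofChars? := by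
  have hin : PySem.Chars.isIn [':'] p = false := by
    rw [← Bool.not_eq_true, pvIsIn_singleton]; exact h
  rw [pvAGo, hin, pvBTokens]
  simp only [Bool.false_eq_true, if_false]
  split
  · rw [pvAListInts_eq]
  · split
    · simp [List.mapM_cons, Option.map]
      cases PySem.Int.ofChars? (PySem.List.slice p (some 2) none) <;> rfl
    · rfl

theorem pvMapM_of_all_ok (ts : List (List Char)) (h : ts.all pvTokOK = true) :
    ∃ l, ts.mapM PySem.Int.ofChars? = some l := by
  induction ts with
  | nil => exact ⟨[], rfl⟩
  | cons t ts ih =>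
    simp only [List.all_cons, Bool.and_eq_true] at h
    obtain ⟨n, hn⟩ := Option.isSome_iff_exists.mp h.1
    obtain ⟨l, hl⟩ := ih h.2
    exact ⟨n :: l, by simp [List.mapM_cons, hn, hl]⟩

theorem pvMapM_append_singleton (ts : List (List Char)) (t : List Char) (pre : List Int)
    (hts : ts.mapM PySem.Int.ofChars? = some pre) :
    (ts ++ [t]).mapM PySem.Int.ofChars? =
      (PySem.Int.ofChars? t).map (fun n => pre ++ [n]) := by
  induction ts generalizing pre with
  | nil =>
    simp at hts
    subst hts
    simp [List.mapM_cons]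
    cases PySem.Int.ofChars? t <;> rfl
  | cons a as ih =>
    simp only [List.mapM_cons] at hts ⊢
    cases ha : PySem.Int.ofChars? a with
    | none => simp [ha] at hts
    | some n =>
      rw [ha] at hts
      cases has : as.mapM PySem.Int.ofChars? with
      | none => simp [has] at hts
      | some l =>
        rw [has] at hts
        obtain rfl : n :: l = pre := by simpa using hts
        rw [List.cons_append, List.mapM_cons, ha, ih l has]
        cases PySem.Int.ofChars? t <;> simp

-- ===== VERDICT (by name: the statement is the Claim_ definition above) =====
theorem interface_name_to_port_spec : Claim_equal_interface_name_to_port := by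
  unfold Claim_equal_interface_name_to_port
  intro s _ hpre
  unfold Spec_interface_name_to_port
  unfold Pre_interface_name_to_port at hpre
  unfold interface_name_to_port interface_name_to_port_alt
  set cs := s.toList with hcs
  by_cases hc : ':' ∈ cs
  · -- colon present
    obtain ⟨k, hk⟩ : ∃ k, cs.length = k + 1 := by
      have hpos : 0 < cs.length := List.length_pos_of_mem hc
      exact ⟨cs.length - 1, by omega⟩
    obtain ⟨hfound, hsplit⟩ := pvPartition_of_mem ':' cs hc
    set h1 := (pvPartition ':' cs).1 with hh1
    set rest := (pvPartition ':' cs).2.2 with hrest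
    have hsplitOn : PySem.Chars.splitOn cs [':'] = h1 :: pvSpl ':' rest := by
      rw [pvSplitOn_eq, hsplit]
    have hhead : ':' ∉ h1 := by
      have := pvSpl_head_not_mem ':' cs
      rw [hsplit] at this; simpa using this
    have hin : PySem.Chars.isIn [':'] cs = true := (pvIsIn_singleton ':' cs).mpr hc
    -- the second split field A reads = B's partition of the tail
    obtain ⟨r1, rt, hr⟩ : ∃ r1 rt, pvSpl ':' rest = r1 :: rt := by
      cases hs : pvSpl ':' rest with
      | nil => exact absurd hs (pvSpl_ne_nil ':' rest)
      | cons a b => exact ⟨a, b, rfl⟩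
    have hget0 : PySem.List.pyGetD (h1 :: pvSpl ':' rest) (0 : Int) ([] : List Char) = h1 := by
      simp [PySem.List.pyGetD_zero]
    have hget1 : PySem.List.pyGetD (h1 :: pvSpl ':' rest) (1 : Int) ([] : List Char)
        = (pvPartition ':' rest).1 := by
      rw [pvPartition_fst_eq_headD, hr]
      simp [PySem.List.pyGetD]
    -- read off the Pre_ conjuncts
    have hne1 : ((h1 :: pvSpl ':' rest).length == 1) = false := by
      rw [hr]; simp
    simp only [hsplitOn, hget0, hget1, hne1, Bool.false_or, Bool.and_eq_true] at hpre
    obtain ⟨hok, hsome, htok⟩ := hpre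
    -- B's tokens exist and all convert
    have hts : ∃ ts, pvBTokens h1 = some ts ∧ ts.all pvTokOK = true := by
      unfold pvBTokens
      unfold pvHeadOK at hok
      unfold pvHeadSome at hsome
      by_cases hd : PySem.Chars.isIn ['-'] h1 = true
      · rw [if_pos hd] at hok ⊢
        exact ⟨_, rfl, hok⟩
      · rw [Bool.not_eq_true] at hd
        rw [hd, Bool.false_or] at hsome
        have hae : PySem.List.slice h1 none (some 2) = ['a', 'e'] := of_decide_eq_true hsome
        simp only [hd, Bool.false_eq_true, if_false, if_pos hae] at hok ⊢
        exact ⟨_, rfl, by simp [hok]⟩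
    obtain ⟨ts, hts, hall⟩ := hts
    obtain ⟨pre, hpre'⟩ := pvMapM_of_all_ok ts hall
    obtain ⟨n, hn⟩ := Option.isSome_iff_exists.mp htok
    -- evaluate both sides
    rw [hk, pvAGo, hin, if_pos rfl, hsplitOn, hget0, hget1, pvAGo_no_colon h1 k hhead]
    simp only [← hh1, ← hrest, hts, hfound, if_true]
    rw [pvMapM_append_singleton ts ((pvPartition ':' rest).1) pre hpre', hn, hpre']
    simp
  · -- no colon
    rw [pvPartition_of_not_mem ':' cs hc]
    have hsplitOn : PySem.Chars.splitOn cs [':'] = [cs] := by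
      rw [pvSplitOn_eq, pvSpl_of_not_mem ':' cs hc]
    have hget0 : PySem.List.pyGetD ([cs] : List (List Char)) (0 : Int) ([] : List Char) = cs := by
      simp [PySem.List.pyGetD_zero]
    obtain ⟨k, hk⟩ : ∃ k, cs.length + 1 = k + 1 := ⟨cs.length, rfl⟩
    rw [hk, pvAGo_no_colon cs k hc]
    cases h : pvBTokens cs <;> simp [h]
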